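-- pv_equiv track=rewrite | github.com/KaranDhayakar/Autonomous-vehicles | lab1_python/src/lab1_review.py | decrement_string
-- ===== SOURCE A (Python) =====
-- def decrement_string(mystr: str) -> str:
--     b = ''
--     for k in mystr:
--          b += chr(ord(k)-1)
--     return b
--     '''
--     letter = [x for x in mystr]
--     a = []
--     i = 0
--     while i<len(letter):
--         z= ord(letter[i]) - 1
--         a[i] = chr(z)
--         i = i +1
--     y = "".join(a)
--     '''
--     ''' Use a single line of Python code for this function (hint: list comprehension)
--         mystr: a string
--         Return a string each of whose characters has is one ASCII value lower than in mystr
--         Hint: ord() returns ASCII value, chr() converts ASCII to character, join() combines elements of a list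
--     '''
--     pass
-- ===== SOURCE B (Python) =====
-- def decrement_string(mystr: str) -> str:
--     table = {ord(c): ord(c) - 1 for c in mystr}
--     return mystr.translate(table)
-- ===== Notes on version B (the rewrite author's own statement) =====
-- stated objective: idiomatic
-- what changed: B builds a translation table mapping each present ordinal to ordinal-1 and delegates the mapping to str.translate, instead of accumulating characters by repeated string concatenation in a loop.
import Mathlib
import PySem

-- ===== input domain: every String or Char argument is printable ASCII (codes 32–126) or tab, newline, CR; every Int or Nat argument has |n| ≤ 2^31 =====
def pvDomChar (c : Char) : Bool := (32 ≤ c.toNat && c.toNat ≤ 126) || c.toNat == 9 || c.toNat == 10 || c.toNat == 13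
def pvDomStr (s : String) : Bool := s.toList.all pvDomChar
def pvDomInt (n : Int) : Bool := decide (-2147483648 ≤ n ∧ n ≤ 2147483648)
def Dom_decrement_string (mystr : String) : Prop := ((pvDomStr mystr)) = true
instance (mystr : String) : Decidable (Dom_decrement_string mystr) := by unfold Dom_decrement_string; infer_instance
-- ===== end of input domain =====

-- B replaces A's concatenation loop by a precomputed ord→ord-1 translation table applied with str.translate (idiomatic; return value only).

-- ===== PORT A =====
-- b = ''; for k in mystr: b += chr(ord(k)-1); return b
def decrement_string (mystr : String) : String :=
  String.ofList (mystr.toList.foldl (fun b k => b ++ [Char.ofNat (k.toNat - 1)]) [])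

-- ===== PORT B =====
-- table = {ord(c): ord(c) - 1 for c in mystr}
def pvTable (cs : List Char) : PySem.Dict Int Int :=
  cs.foldl (fun d c => d.insert ((c.toNat : Int)) ((c.toNat : Int) - 1)) PySem.Dict.empty

-- mystr.translate(table): each char is looked up by ordinal; missing ordinals map to themselves
def decrement_string_alt (mystr : String) : String :=
  let table := pvTable mystr.toList
  String.ofList (mystr.toList.map (fun c =>
    match table.get? ((c.toNat : Int)) with
    | some n => Char.ofNat n.toNat
    | none => c))

-- ===== PRECONDITION & SPEC =====
def Spec_decrement_string (mystr : String) (out : String) : Prop := out = decrement_string_alt mystr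
instance (mystr : String) (out : String) : Decidable (Spec_decrement_string mystr out) := by unfold Spec_decrement_string; infer_instance

-- ===== CLAIM (what is proved, stated in full; the proofs are below) =====
def Claim_equal_decrement_string : Prop := ∀ (mystr : String), Dom_decrement_string mystr → Spec_decrement_string mystr (decrement_string mystr)

-- ===== LEMMAS AND PROOFS =====

-- Every insert of the table loop binds k ↦ k - 1, so once a key is present (or becomes present) its value is k - 1.
lemma pvTable_foldl_get (cs : List Char) (d : PySem.Dict Int Int) (k : Int)
    (h : (∃ c ∈ cs, (c.toNat : Int) = k) ∨ d.get? k = some (k - 1)) :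
    (cs.foldl (fun d c => d.insert ((c.toNat : Int)) ((c.toNat : Int) - 1)) d).get? k
      = some (k - 1) := by
  induction cs generalizing d with
  | nil =>
    rcases h with ⟨c, hc, _⟩ | h
    · exact absurd hc (List.not_mem_nil)
    · simpa using h
  | cons c cs ih =>
    apply ih
    by_cases hk : (c.toNat : Int) = k
    · right
      show (d.insert ((c.toNat : Int)) ((c.toNat : Int) - 1)).get? k = some (k - 1)
      rw [hk, PySem.Dict.get?_insert_self]
    · rcases h with ⟨c', hc', hk'⟩ | h
      · rcases List.mem_cons.mp hc' with rfl | hmem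
        · exact absurd hk' hk
        · exact Or.inl ⟨c', hmem, hk'⟩
      · right
        show (d.insert ((c.toNat : Int)) ((c.toNat : Int) - 1)).get? k = some (k - 1)
        rw [PySem.Dict.get?_insert_of_ne _ _ (fun he => hk he.symm)]; exact h

lemma pvTable_get (cs : List Char) (c : Char) (hc : c ∈ cs) :
    (pvTable cs).get? ((c.toNat : Int)) = some ((c.toNat : Int) - 1) := by
  exact pvTable_foldl_get cs PySem.Dict.empty _ (Or.inl ⟨c, hc, rfl⟩)

-- ===== VERDICT (by name: the statement is the Claim_ definition above) =====
theorem decrement_string_spec : Claim_equal_decrement_string := by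
  intro mystr _
  unfold Spec_decrement_string decrement_string decrement_string_alt
  rw [PySem.List.foldl_append_singleton_eq_map]
  congr 1
  apply List.map_congr_left
  intro c hc
  rw [pvTable_get mystr.toList c hc]
  have h1 : (1 : Nat) ≤ c.toNat ∨ c.toNat = 0 := by omega
  rcases h1 with h1 | h1
  · congr 1; omega
  · simp [h1, Char.ofNat]
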